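-- pv_equiv track=rewrite | github.com/lake-of-dreams/oracle-datastore-agent | analyzer/llm_data_analyzer.py | _is_code
-- ===== SOURCE A (Python) =====
-- def _is_code(data_str: str) -> bool:
--     """Check if data is code"""
--     code_indicators = [
--         'def ', 'function ', 'class ', 'import ', 'from ',
--         'public ', 'private ', 'protected ', 'static ',
--         'int ', 'string ', 'var ', 'let ', 'const ',
--         '<?php', '#!/', '//', '/*', '#include'
--     ]
--     return any(indicator in data_str for indicator in code_indicators)
-- ===== SOURCE B (Python) =====
-- _CODE_INDICATORS = [
--     'def ', 'function ', 'class ', 'import ', 'from ',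
--     'public ', 'private ', 'protected ', 'static ',
--     'int ', 'string ', 'var ', 'let ', 'const ',
--     '<?php', '#!/', '//', '/*', '#include'
-- ]
--
--
-- def _is_code(data_str: str) -> bool:
--     """Single left-to-right scan: at each position, test whether any
--     indicator starts there (position-major, instead of one full
--     substring search per indicator)."""
--     for i in range(len(data_str) + 1):
--         for indicator in _CODE_INDICATORS:
--             if data_str.startswith(indicator, i):
--                 return True
--     return False
-- ===== Notes on version B (the rewrite author's own statement) =====
-- stated objective: alternative
-- what changed: Replaces 19 independent full-string substring searches ('in' per indicator) with one left-to-right position-major scan that tests all indicators at each position.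
import Mathlib
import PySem

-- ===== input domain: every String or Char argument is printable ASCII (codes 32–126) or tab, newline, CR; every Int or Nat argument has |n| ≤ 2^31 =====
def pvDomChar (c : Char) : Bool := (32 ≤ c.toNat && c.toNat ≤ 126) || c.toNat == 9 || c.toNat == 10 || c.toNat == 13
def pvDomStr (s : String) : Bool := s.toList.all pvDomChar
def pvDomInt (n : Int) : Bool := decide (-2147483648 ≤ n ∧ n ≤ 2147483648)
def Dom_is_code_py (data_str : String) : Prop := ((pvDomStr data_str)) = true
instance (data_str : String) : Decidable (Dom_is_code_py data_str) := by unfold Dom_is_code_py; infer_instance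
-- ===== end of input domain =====

-- B replaces A's per-indicator full substring searches by one position-major scan
-- testing all indicators at each position (objective: alternative).

-- ===== PORT A =====
def codeIndicators : List String :=
  ["def ", "function ", "class ", "import ", "from ",
   "public ", "private ", "protected ", "static ",
   "int ", "string ", "var ", "let ", "const ",
   "<?php", "#!/", "//", "/*", "#include"]

-- any(indicator in data_str for indicator in code_indicators)
def is_code_py (data_str : String) : Bool :=
  codeIndicators.any (fun indicator => PySem.Str.isIn indicator data_str)

-- ===== PORT B =====
-- B's indicator list as character lists (B matches per position, character-wise)
def codeIndicatorsB : List (List Char) :=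
  ["def ".toList, "function ".toList, "class ".toList, "import ".toList, "from ".toList,
   "public ".toList, "private ".toList, "protected ".toList, "static ".toList,
   "int ".toList, "string ".toList, "var ".toList, "let ".toList, "const ".toList,
   "<?php".toList, "#!/".toList, "//".toList, "/*".toList, "#include".toList]

-- the position-major scan: at each suffix, does some indicator start here?
def scanPos (inds : List (List Char)) : List Char → Bool
  | [] => inds.any (fun p => p.isPrefixOf ([] : List Char))
  | c :: rest => inds.any (fun p => p.isPrefixOf (c :: rest)) || scanPos inds rest

def is_code_py_alt (data_str : String) : Bool :=
  scanPos codeIndicatorsB data_str.toList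

-- ===== PRECONDITION & SPEC =====
def Spec_is_code_py (data_str : String) (out : Bool) : Prop := out = is_code_py_alt data_str
instance (data_str : String) (out : Bool) : Decidable (Spec_is_code_py data_str out) := by unfold Spec_is_code_py; infer_instance

-- ===== CLAIM (what is proved, stated in full; the proofs are below) =====
def Claim_equal_is_code_py : Prop := ∀ (data_str : String), Dom_is_code_py data_str → Spec_is_code_py data_str (is_code_py data_str)

-- ===== LEMMAS AND PROOFS =====

-- pointwise congruence for List.any
theorem anyCongr {α : Type} (l : List α) (f g : α → Bool)
    (h : ∀ a ∈ l, f a = g a) : l.any f = l.any g := by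
  induction l with
  | nil => rfl
  | cons a t ih =>
    simp only [List.any_cons, h a (List.mem_cons_self), ih (fun b hb => h b (List.mem_cons_of_mem a hb))]

-- List.any distributes over pointwise disjunction
theorem anyOr {α : Type} (l : List α) (f g : α → Bool) :
    l.any (fun x => f x || g x) = (l.any f || l.any g) := by
  induction l with
  | nil => rfl
  | cons a t ih =>
    simp only [List.any_cons, ih]
    cases f a <;> cases g a <;> cases t.any f <;> cases t.any g <;> rfl

-- one indicator: "p occurs in c :: rest" unfolds to "p starts here, or occurs in rest"
theorem isIn_cons (p : List Char) (c : Char) (rest : List Char) :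
    PySem.Chars.isIn p (c :: rest)
      = (p.isPrefixOf (c :: rest) || PySem.Chars.isIn p rest) := by
  rcases h : (p.isPrefixOf (c :: rest) || PySem.Chars.isIn p rest) with _ | _
  · simp only [Bool.or_eq_false_iff] at h
    rw [PySem.Chars.isIn_eq_false_iff, List.infix_cons_iff]
    rintro (hp | hi)
    · rw [← List.isPrefixOf_iff_prefix] at hp
      simp [hp] at h
    · rw [← PySem.Chars.isIn_iff_infix] at hi
      simp [hi] at h
  · rw [PySem.Chars.isIn_iff_infix, List.infix_cons_iff]
    rcases Bool.or_eq_true_iff.mp h with hp | hi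
    · exact Or.inl (List.isPrefixOf_iff_prefix.mp hp)
    · exact Or.inr (by rwa [PySem.Chars.isIn_iff_infix] at hi)

theorem isIn_nil (p : List Char) :
    PySem.Chars.isIn p ([] : List Char) = p.isPrefixOf ([] : List Char) := by
  rcases p with _ | ⟨c, cs⟩
  · simp [PySem.Chars.isIn_nil, List.isPrefixOf]
  · simp [List.isPrefixOf, PySem.Chars.isIn_eq_false_iff]

-- the scan computes the disjunction of the per-indicator searches
theorem scanPos_eq_any_isIn (inds : List (List Char)) (cs : List Char) :
    scanPos inds cs = inds.any (fun p => PySem.Chars.isIn p cs) := by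
  induction cs with
  | nil =>
    simp only [scanPos]
    exact (anyCongr inds _ _ (fun p _ => isIn_nil p)).symm
  | cons c rest ih =>
    simp only [scanPos, ih]
    rw [← anyOr]
    exact (anyCongr inds _ _ (fun p _ => (isIn_cons p c rest).symm))

-- ===== VERDICT (by name: the statement is the Claim_ definition above) =====
theorem is_code_py_spec : Claim_equal_is_code_py := by
  intro s _
  unfold Spec_is_code_py is_code_py is_code_py_alt
  rw [scanPos_eq_any_isIn]
  rw [show codeIndicatorsB = codeIndicators.map String.toList from rfl, List.any_map]
  exact anyCongr _ _ _ (fun ind _ => by simp [PySem.Str.isIn_eq, Function.comp])
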